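-- pv_equiv track=rewrite | github.com/vglg2024/Threat-Hunting-Assistant | tha_beaconing.py | detect_sequential_ports
-- ===== SOURCE A (Python) =====
-- SEQ_PORT_MIN_SESSIONS    = 3      # Minimum sessions with incrementing src ports
--
-- SEQ_PORT_MAX_GAP         = 5      # Maximum gap between sequential port numbers
--
-- def detect_sequential_ports(src_ports: list[int]) -> tuple[bool, list[int]]:
--     """
--     Detect sequential ephemeral source port pattern.
--
--     When a C2 implant opens a new TCP session for each beacon, the OS
--     assigns incrementing source ports. This leaves a fingerprint:
--     e.g., 56198, 56199, 56200 ... or with small gaps: 61826, 61827, 61828.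
--
--     Returns (is_sequential, ordered_port_list).
--     """
--     if len(src_ports) < SEQ_PORT_MIN_SESSIONS:
--         return False, []
--
--     # Sort ports and check for sequential runs
--     sorted_ports = sorted(set(src_ports))
--     max_run = 1
--     current_run = 1
--     run_start_idx = 0
--     best_run_start = 0
--
--     for i in range(1, len(sorted_ports)):
--         gap = sorted_ports[i] - sorted_ports[i - 1]
--         if gap <= SEQ_PORT_MAX_GAP:
--             current_run += 1
--             if current_run > max_run:
--                 max_run = current_run
--                 best_run_start = run_start_idx
--         else:
--             current_run = 1
--             run_start_idx = i
--
--     if max_run >= SEQ_PORT_MIN_SESSIONS: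
--         sequential_ports = sorted_ports[best_run_start:best_run_start + max_run]
--         return True, sequential_ports
--
--     return False, []
-- ===== SOURCE B (Python) =====
-- SEQ_PORT_MIN_SESSIONS = 3
-- SEQ_PORT_MAX_GAP = 5
--
-- def detect_sequential_ports(src_ports: list[int]) -> tuple[bool, list[int]]:
--     """Hash-set walk (classic 'longest consecutive sequence' style, adapted to
--     gaps <= SEQ_PORT_MAX_GAP): a port is a run START iff no port lies within
--     SEQ_PORT_MAX_GAP below it; from each start, walk forward by set membership
--     to materialise its run.  No sorted-adjacent-gap scan."""
--     if len(src_ports) < SEQ_PORT_MIN_SESSIONS: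
--         return False, []
--     s = set(src_ports)
--     best = []
--     for p in sorted(q for q in s
--                     if not any(q - d in s for d in range(1, SEQ_PORT_MAX_GAP + 1))):
--         run = [p]
--         while True:
--             nxt = next((run[-1] + d for d in range(1, SEQ_PORT_MAX_GAP + 1)
--                         if run[-1] + d in s), None)
--             if nxt is None:
--                 break
--             run.append(nxt)
--         if len(run) > len(best):
--             best = run
--     if len(best) >= SEQ_PORT_MIN_SESSIONS:
--         return True, best
--     return False, []
-- ===== Notes on version B (the rewrite author's own statement) =====
-- stated objective: alternative
-- what changed: A sorts the distinct ports and scans adjacent gaps with run counters and a slice; B uses the classic hash-set 'longest consecutive sequence' technique adapted to gap<=5: it finds run starts (ports with no other port within 5 below) by set membership and walks each run forward through the set, never examining adjacent gaps of a sorted list.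
import Mathlib
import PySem

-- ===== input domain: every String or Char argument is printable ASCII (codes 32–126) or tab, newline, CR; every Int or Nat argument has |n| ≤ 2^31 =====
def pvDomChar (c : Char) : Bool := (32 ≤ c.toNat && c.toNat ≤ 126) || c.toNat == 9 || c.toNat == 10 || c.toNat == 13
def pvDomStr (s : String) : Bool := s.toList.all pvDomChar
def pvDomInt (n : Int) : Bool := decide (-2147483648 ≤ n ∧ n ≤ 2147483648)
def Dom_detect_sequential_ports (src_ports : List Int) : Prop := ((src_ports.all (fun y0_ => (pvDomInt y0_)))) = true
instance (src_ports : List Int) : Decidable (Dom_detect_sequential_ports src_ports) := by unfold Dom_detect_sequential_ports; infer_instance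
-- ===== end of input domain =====

-- B replaces A's sort-then-adjacent-gap scan by the hash-set 'longest consecutive
-- sequence' technique adapted to gaps ≤ 5: run starts are found by set membership
-- and each run is materialised by walking forward through the set.
-- Objective: alternative algorithm, same cost.

-- ===== PORT A =====
-- the loop body of A (gap = sorted_ports[i] - sorted_ports[i-1]); state = (max_run, current_run, run_start_idx, best_run_start)
def stepA (sorted_ports : List Int) (st : Int × Int × Int × Int) (i : Int) : Int × Int × Int × Int :=
  let gap := PySem.List.pyGetD sorted_ports i 0 - PySem.List.pyGetD sorted_ports (i - 1) 0
  -- indices 1 ≤ i < len are always in range here, so pyGetD's default is never used (exact)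
  if gap ≤ 5 then
    if st.2.1 + 1 > st.1 then (st.2.1 + 1, st.2.1 + 1, st.2.2.1, st.2.2.1)
    else (st.1, st.2.1 + 1, st.2.2.1, st.2.2.2)
  else (st.1, 1, i, st.2.2.2)

def detect_sequential_ports (src_ports : List Int) : Bool × List Int :=
  if src_ports.length < 3 then (false, [])
  else
    let sorted_ports := PySem.List.sorted (PySem.Set.ofList src_ports) (fun x => x) false
    let st := (PySem.List.pyRange 1 (sorted_ports.length : Int) 1).foldl (stepA sorted_ports) (1, 1, 0, 0)
    if st.1 ≥ 3 then
      (true, PySem.List.slice sorted_ports (some st.2.2.2) (some (st.2.2.2 + st.1)))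
    else (false, [])

-- ===== PORT B =====
-- next((last + d for d in range(1, 6) if last + d in s), None): first d that hits the set
def firstHit (s : PySem.Set Int) (last : Int) : List Int → Option Int
  | [] => none
  | d :: ds => if PySem.Set.contains s (last + d) then some (last + d) else firstHit s last ds

-- the 'while True' walk of Source B; fuel = len(s) bounds the iterations (each step adds a
-- strictly larger member of s to the run, so at most len(s) steps happen — exact)
def walkB (s : PySem.Set Int) : Nat → List Int → Int → List Int
  | 0, run, _ => run
  | fuel + 1, run, last =>
    match firstHit s last (PySem.List.pyRange 1 6 1) with
    | none => run
    | some nxt => walkB s fuel (run ++ [nxt]) nxt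

-- body of Source B's 'for p in sorted(...)' loop; best-so-far is the accumulator
def stepWalk (s : PySem.Set Int) (best : List Int) (p : Int) : List Int :=
  let run := walkB s s.length [p] p
  if best.length < run.length then run else best

def detect_sequential_ports_alt (src_ports : List Int) : Bool × List Int :=
  if src_ports.length < 3 then (false, [])
  else
    let s : PySem.Set Int := PySem.Set.ofList src_ports
    let starts := PySem.List.sorted
      (s.filter (fun q => !((PySem.List.pyRange 1 6 1).any (fun d => PySem.Set.contains s (q - d)))))
      (fun x => x) false
    let best := starts.foldl (stepWalk s) []
    if 3 ≤ best.length then (true, best) else (false, [])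

-- ===== PRECONDITION & SPEC =====
def Spec_detect_sequential_ports (src_ports : List Int) (out : Bool × List Int) : Prop := out = detect_sequential_ports_alt src_ports
instance (src_ports : List Int) (out : Bool × List Int) : Decidable (Spec_detect_sequential_ports src_ports out) := by unfold Spec_detect_sequential_ports; infer_instance

-- ===== CLAIM (what is proved, stated in full; the proofs are below) =====
def Claim_equal_detect_sequential_ports : Prop := ∀ (src_ports : List Int), Dom_detect_sequential_ports src_ports → Spec_detect_sequential_ports src_ports (detect_sequential_ports src_ports)

-- ===== LEMMAS AND PROOFS =====

-- proof-side reference: grouping the sorted distinct list into maximal gap-≤5 runs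

-- split prev t = (maximal chain continuing prev, remainder)
def split : Int → List Int → List Int × List Int
  | _, [] => ([], [])
  | prev, p :: t => if p - prev ≤ 5 then (p :: (split p t).1, (split p t).2) else ([], p :: t)

lemma split_len : ∀ (prev : Int) (t : List Int), (split prev t).2.length ≤ t.length := by
  intro prev t
  induction t generalizing prev with
  | nil => simp [split]
  | cons p t ih =>
    simp only [split]
    split_ifs
    · exact le_trans (ih p) (by simp)
    · simp

lemma split_append : ∀ (prev : Int) (t : List Int), (split prev t).1 ++ (split prev t).2 = t := by
  intro prev t
  induction t generalizing prev with
  | nil => simp [split]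
  | cons p t ih =>
    simp only [split]
    split_ifs
    · simpa using ih p
    · simp

def runsOf : List Int → List (List Int)
  | [] => []
  | a :: t => (a :: (split a t).1) :: runsOf (split a t).2
termination_by l => l.length
decreasing_by exact Nat.lt_succ_of_le (split_len a t)

lemma runsOf_flatten : ∀ (l : List Int), (runsOf l).flatten = l := by
  intro l
  induction l using runsOf.induct with
  | case1 => simp [runsOf]
  | case2 a t ih =>
    simp only [runsOf, List.flatten_cons, ih]
    simp [split_append a t]

-- A's loop rephrased as a recursion over the remaining elements, carrying the
-- loop index i and the previous element prev (= sorted_ports[i-1]).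
def recA (st : Int × Int × Int × Int) (i : Int) (prev : Int) : List Int → Int × Int × Int × Int
  | [] => st
  | p :: t =>
      recA (if p - prev ≤ 5 then
              if st.2.1 + 1 > st.1 then (st.2.1 + 1, st.2.1 + 1, st.2.2.1, st.2.2.1)
              else (st.1, st.2.1 + 1, st.2.2.1, st.2.2.2)
            else (st.1, 1, i, st.2.2.2)) (i + 1) p t

-- proof-side grouping fold (the previous-run bookkeeping of A, reorganised as runs)
def stepB (st : List (List Int) × List Int) (p : Int) : List (List Int) × List Int :=
  if st.2 ≠ [] ∧ p - PySem.List.pyGetD st.2 (-1) 0 ≤ 5 then (st.1, st.2 ++ [p])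
  else ((if st.2 ≠ [] then st.1 ++ [st.2] else st.1), [p])

-- "(mr, brs) name the first longest run": runs = pre ++ b :: post, b is strictly
-- longer than every run before it, at least as long as every run after it,
-- mr its length, brs the index in the flattening where it starts.
def Best (runs : List (List Int)) (mr brs : Int) : Prop :=
  ∃ pre b post, runs = pre ++ b :: post ∧ b ≠ [] ∧ mr = (b.length : Int) ∧ brs = (pre.flatten.length : Int) ∧
    (∀ r ∈ pre, r.length < b.length) ∧ (∀ r ∈ post, r.length ≤ b.length)

-- invariant tying A's (max_run, best_run_start) to the runs built so far:
-- either the first longest run is already closed (and the current run does not beat it),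
-- or the current run is strictly longer than every closed run
def InvA (done : List (List Int)) (cur : List Int) (mr brs : Int) : Prop :=
  (∃ pre b post₀, done = pre ++ b :: post₀ ∧ b ≠ [] ∧ mr = (b.length : Int) ∧ brs = (pre.flatten.length : Int) ∧
     (∀ r ∈ pre, r.length < b.length) ∧ (∀ r ∈ post₀, r.length ≤ b.length) ∧ cur.length ≤ b.length)
  ∨ (mr = (cur.length : Int) ∧ brs = (done.flatten.length : Int) ∧ ∀ r ∈ done, r.length < cur.length)

lemma bridgeA (sp : List Int) : ∀ (t pref : List Int) (a : Int) (st : Int × Int × Int × Int),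
    sp = pref ++ a :: t →
    (PySem.List.pyRange ((pref.length : Int) + 1) (sp.length : Int) 1).foldl (stepA sp) st
      = recA st ((pref.length : Int) + 1) a t := by
  intro t
  induction t with
  | nil =>
    intro pref a st hsp
    have hlen : (sp.length : Int) = (pref.length : Int) + 1 := by subst hsp; simp
    rw [hlen, PySem.List.pyRange_one_eq_nil (by omega)]
    rfl
  | cons p t ih =>
    intro pref a st hsp
    have hlen : (sp.length : Int) = (pref.length : Int) + (t.length : Int) + 2 := by
      subst hsp; simp; ring
    rw [PySem.List.pyRange_one_cons (by omega), List.foldl_cons]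
    have hget_a : PySem.List.pyGetD sp ((pref.length : Int) + 1 - 1) 0 = a := by
      rw [show ((pref.length : Int) + 1 - 1) = (pref.length : Int) by ring]
      rw [PySem.List.pyGetD_eq_getElem sp 0 (by positivity) (by omega)]
      subst hsp
      simp [List.getElem_append_right (Nat.le_refl pref.length)]
    have hget_p : PySem.List.pyGetD sp ((pref.length : Int) + 1) 0 = p := by
      rw [show ((pref.length : Int) + 1) = ((pref.length + 1 : Nat) : Int) by push_cast; ring]
      rw [PySem.List.pyGetD_eq_getElem sp 0 (by positivity) (by omega)]
      subst hsp
      have : pref.length + 1 - pref.length = 1 := by omega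
      simp [List.getElem_append_right (by omega : pref.length ≤ (pref.length + 1 : Nat) ), this]
    have hstep : stepA sp st ((pref.length : Int) + 1)
        = (if p - a ≤ 5 then
             if st.2.1 + 1 > st.1 then (st.2.1 + 1, st.2.1 + 1, st.2.2.1, st.2.2.1)
             else (st.1, st.2.1 + 1, st.2.2.1, st.2.2.2)
           else (st.1, 1, (pref.length : Int) + 1, st.2.2.2)) := by
      simp only [stepA, hget_a, hget_p]
    have := ih (pref ++ [a]) p (stepA sp st ((pref.length : Int) + 1)) (by simpa using hsp)
    simp only [List.length_append, List.length_cons, List.length_nil] at this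
    simp only [recA]
    rw [← hstep]
    push_cast at this ⊢
    exact this

lemma stepB_of_ne (done : List (List Int)) (cur : List Int) (hc : cur ≠ []) (p : Int) :
    stepB (done, cur) p = if p - cur.getLast hc ≤ 5 then (done, cur ++ [p]) else (done ++ [cur], [p]) := by
  simp only [stepB, PySem.List.pyGetD_neg_one cur 0 hc]
  by_cases h : p - cur.getLast hc ≤ 5 <;> simp [hc, h]

lemma main_inv : ∀ (rest : List Int) (done : List (List Int)) (cur : List Int) (hc : cur ≠ []) (mr brs : Int),
    InvA done cur mr brs →
    (rest.foldl stepB (done, cur)).2 ≠ [] ∧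
    ((rest.foldl stepB (done, cur)).1.flatten ++ (rest.foldl stepB (done, cur)).2 = done.flatten ++ cur ++ rest) ∧
    Best ((rest.foldl stepB (done, cur)).1 ++ [(rest.foldl stepB (done, cur)).2])
      (recA (mr, (cur.length : Int), (done.flatten.length : Int), brs)
        ((done.flatten.length : Int) + (cur.length : Int)) (cur.getLast hc) rest).1
      (recA (mr, (cur.length : Int), (done.flatten.length : Int), brs)
        ((done.flatten.length : Int) + (cur.length : Int)) (cur.getLast hc) rest).2.2.2 := by
  intro rest
  induction rest with
  | nil =>
    intro done cur hc mr brs hinv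
    refine ⟨hc, by simp, ?_⟩
    simp only [recA, List.foldl_nil]
    rcases hinv with ⟨pre, b, post₀, hdone, hb, hmr, hbrs, hpre, hpost, hcur⟩ | ⟨hmr, hbrs, hall⟩
    · refine ⟨pre, b, post₀ ++ [cur], by simp [hdone], hb, hmr, hbrs, hpre, ?_⟩
      intro r hr
      rcases List.mem_append.1 hr with h | h
      · exact hpost r h
      · simp only [List.mem_singleton] at h; subst h; exact hcur
    · exact ⟨done, cur, [], rfl, hc, hmr, hbrs, hall, by simp⟩
  | cons p t ih =>
    intro done cur hc mr brs hinv
    simp only [List.foldl_cons, stepB_of_ne done cur hc p, recA]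
    by_cases h5 : p - cur.getLast hc ≤ 5
    · rw [if_pos h5, if_pos h5]
      have hne : cur ++ [p] ≠ [] := by simp
      have hlast : (cur ++ [p]).getLast hne = p := by simp
      by_cases hgt : (cur.length : Int) + 1 > mr
      · rw [if_pos hgt]
        have hinv' : InvA done (cur ++ [p]) ((cur.length : Int) + 1) ((done.flatten.length : Int)) := by
          right
          refine ⟨by push_cast [List.length_append, List.length_cons, List.length_nil]; ring, rfl, ?_⟩
          intro r hr
          rcases hinv with ⟨pre, b, post₀, hdone, hb, hmr, hbrs, hpre, hpost, hcur⟩ | ⟨hmr, hbrs, hall⟩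
          · subst hdone
            have hrb : r.length ≤ b.length := by
              rcases List.mem_append.1 hr with h | h
              · exact le_of_lt (hpre r h)
              · rcases List.mem_cons.1 h with h | h
                · subst h; rfl
                · exact hpost r h
            have : (b.length : Int) < (cur.length : Int) + 1 := by omega
            simp only [List.length_append, List.length_singleton]
            omega
          · have := hall r hr
            simp only [List.length_append, List.length_singleton]
            omega
        have H := ih done (cur ++ [p]) hne ((cur.length : Int) + 1) ((done.flatten.length : Int)) hinv'
        rw [hlast] at H
        refine ⟨H.1, ?_, ?_⟩
        · rw [H.2.1]; simp
        · have := H.2.2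
          push_cast [List.length_append] at this ⊢
          convert this using 3
      · rw [if_neg hgt]
        have hinv' : InvA done (cur ++ [p]) mr brs := by
          rcases hinv with ⟨pre, b, post₀, hdone, hb, hmr, hbrs, hpre, hpost, hcur⟩ | ⟨hmr, hbrs, hall⟩
          · left
            refine ⟨pre, b, post₀, hdone, hb, hmr, hbrs, hpre, hpost, ?_⟩
            simp only [List.length_append, List.length_singleton]
            omega
          · exfalso; omega
        have H := ih done (cur ++ [p]) hne mr brs hinv'
        rw [hlast] at H
        refine ⟨H.1, ?_, ?_⟩
        · rw [H.2.1]; simp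
        · have := H.2.2
          push_cast [List.length_append] at this ⊢
          convert this using 3
    · rw [if_neg h5, if_neg h5]
      have hne : ([p] : List Int) ≠ [] := by simp
      have hinv' : InvA (done ++ [cur]) [p] mr brs := by
        left
        rcases hinv with ⟨pre, b, post₀, hdone, hb, hmr, hbrs, hpre, hpost, hcur⟩ | ⟨hmr, hbrs, hall⟩
        · refine ⟨pre, b, post₀ ++ [cur], by simp [hdone], hb, hmr, hbrs, hpre, ?_, ?_⟩
          · intro r hr
            rcases List.mem_append.1 hr with h | h
            · exact hpost r h
            · simp only [List.mem_singleton] at h; subst h; exact hcur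
          · simpa using List.length_pos_of_ne_nil hb
        · refine ⟨done, cur, [], rfl, hc, hmr, hbrs, hall, by simp, ?_⟩
          simpa using List.length_pos_of_ne_nil hc
      have H := ih (done ++ [cur]) [p] hne mr brs hinv'
      have hlast : ([p] : List Int).getLast hne = p := by simp
      rw [hlast] at H
      refine ⟨H.1, ?_, ?_⟩
      · rw [H.2.1]; simp
      · have := H.2.2
        push_cast [List.flatten_append, List.length_append] at this ⊢
        convert this using 3 <;> (simp only [List.length_append, List.length_cons, List.length_nil, List.flatten_cons, List.flatten_nil]; push_cast; ring_nf)

-- the grouping fold computes runsOf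
lemma foldB_split : ∀ (t : List Int) (done : List (List Int)) (cur : List Int) (hc : cur ≠ []),
    (t.foldl stepB (done, cur)).1 ++ [(t.foldl stepB (done, cur)).2]
      = done ++ (cur ++ (split (cur.getLast hc) t).1) :: runsOf (split (cur.getLast hc) t).2 := by
  intro t
  induction t with
  | nil => intro done cur hc; simp [split, runsOf]
  | cons p t ih =>
    intro done cur hc
    simp only [List.foldl_cons, stepB_of_ne done cur hc p, split]
    by_cases h5 : p - cur.getLast hc ≤ 5
    · rw [if_pos h5, if_pos h5]
      have hne : cur ++ [p] ≠ [] := by simp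
      have := ih done (cur ++ [p]) hne
      rw [List.getLast_append_singleton] at this
      rw [this]
      simp
    · rw [if_neg h5, if_neg h5]
      have hne : ([p] : List Int) ≠ [] := by simp
      have := ih (done ++ [cur]) [p] hne
      simp only [List.getLast_singleton] at this
      rw [this]
      simp only [runsOf]
      simp

-- every element of a chain has a predecessor (in the chain or its anchor) with gap in [1,5]
lemma split_mem_pred : ∀ (prev : Int) (t : List Int), (prev :: t).Pairwise (· < ·) →
    ∀ e ∈ (split prev t).1, ∃ pd, (pd = prev ∨ pd ∈ (split prev t).1) ∧ 1 ≤ e - pd ∧ e - pd ≤ 5 := by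
  intro prev t
  induction t generalizing prev with
  | nil => simp [split]
  | cons p t ih =>
    intro hpw e he
    simp only [split] at he ⊢
    by_cases h5 : p - prev ≤ 5
    · rw [if_pos h5] at he ⊢
      have hlt : prev < p := (List.pairwise_cons.1 hpw).1 p (by simp)
      rcases List.mem_cons.1 he with rfl | he'
      · exact ⟨prev, Or.inl rfl, by omega, by omega⟩
      · obtain ⟨pd, hpd, h1, h2⟩ := ih p (List.pairwise_cons.1 hpw).2 e he'
        refine ⟨pd, Or.inr ?_, h1, h2⟩
        rcases hpd with rfl | hmem'
        · simp
        · simp [hmem']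
    · rw [if_neg h5] at he
      simp at he

-- past the chain, everything is more than 5 above the whole chain
lemma split_rest_gap : ∀ (prev : Int) (t : List Int), (prev :: t).Pairwise (· < ·) →
    ∀ y ∈ (split prev t).2, ∀ x, (x = prev ∨ x ∈ (split prev t).1) → x + 5 < y := by
  intro prev t
  induction t generalizing prev with
  | nil => simp [split]
  | cons p t ih =>
    intro hpw y hy x hx
    simp only [split] at hy hx
    by_cases h5 : p - prev ≤ 5
    · rw [if_pos h5] at hy hx
      have hrec := ih p (List.pairwise_cons.1 hpw).2 y hy
      rcases hx with rfl | hx'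
      · have h1 : p + 5 < y := hrec p (Or.inl rfl)
        have hlt : x < p := (List.pairwise_cons.1 hpw).1 p (by simp)
        omega
      · rcases List.mem_cons.1 hx' with rfl | hx'' 
        · exact hrec x (Or.inl rfl)
        · exact hrec x (Or.inr hx'')
    · rw [if_neg h5] at hy hx
      rcases hx with rfl | hx'
      · rcases List.mem_cons.1 hy with rfl | hy'
        · omega
        · have h1 : p < y := (List.pairwise_cons.1 (List.pairwise_cons.1 hpw).2).1 y hy'
          omega
      · simp at hx'

lemma firstHit_none (s : PySem.Set Int) (cur : Int) :
    ∀ L : List Int, (∀ d ∈ L, PySem.Set.contains s (cur + d) = false) → firstHit s cur L = none := by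
  intro L
  induction L with
  | nil => intro _; rfl
  | cons d ds ih =>
    intro h
    simp only [firstHit, h d (by simp)]
    exact ih (fun d' hd' => h d' (by simp [hd']))

-- firstHit over range(1,6) finds exactly the successor of cur in the sorted list, when within 5
lemma firstHit_char (s : PySem.Set Int) (u : List Int) (cur : Int) (v : List Int)
    (hmem : ∀ x : Int, PySem.Set.contains s x = true ↔ x ∈ u ++ cur :: v)
    (hpw : (u ++ cur :: v).Pairwise (· < ·)) :
    firstHit s cur (PySem.List.pyRange 1 6 1)
      = (match v with | [] => none | b :: _ => if b - cur ≤ 5 then some b else none) := by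
  have hR : PySem.List.pyRange 1 6 1 = [1, 2, 3, 4, 5] := by decide
  rw [hR]
  have hpa := List.pairwise_append.1 hpw
  have hu : ∀ x ∈ u, x < cur := fun x hx => hpa.2.2 x hx cur (by simp)
  have hcv := List.pairwise_cons.1 hpa.2.1
  have hv : ∀ y ∈ v, cur < y := hcv.1
  match v with
  | [] =>
    apply firstHit_none
    intro d hd
    by_contra hcon
    have : PySem.Set.contains s (cur + d) = true := by
      cases h : PySem.Set.contains s (cur + d)
      · exact absurd h hcon
      · rfl
    have hm := (hmem _).1 this
    have hd' : 1 ≤ d := by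
      simp only [List.mem_cons, List.not_mem_nil, or_false] at hd
      rcases hd with rfl | rfl | rfl | rfl | rfl <;> omega
    rcases List.mem_append.1 hm with h | h
    · have := hu _ h; omega
    · simp only [List.mem_cons, List.not_mem_nil, or_false] at h
      omega
  | b :: v' =>
    have hbcur : cur < b := hv b (by simp)
    have hv' : ∀ y ∈ v', b < y := (List.pairwise_cons.1 hcv.2).1
    have hbetween : ∀ y : Int, cur < y → y < b → PySem.Set.contains s y = false := by
      intro y h1 h2
      cases h : PySem.Set.contains s y
      · rfl
      · exfalso
        have hm := (hmem _).1 h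
        rcases List.mem_append.1 hm with hh | hh
        · have := hu _ hh; omega
        · rcases List.mem_cons.1 hh with rfl | hh'
          · omega
          · rcases List.mem_cons.1 hh' with rfl | hh''
            · omega
            · have := hv' _ hh''; omega
    have hbmem : b ∈ u ++ cur :: b :: v' := by simp
    have hbcont : PySem.Set.contains s b = true := (hmem b).2 hbmem
    have hbin : b ∈ s := by have h' := hbcont; simp [PySem.Set.contains] at h'; exact h'
    have hnotin : ∀ y : Int, cur < y → y < b → y ∉ s := by
      intro y h1 h2
      have h' := hbetween y h1 h2
      simp [PySem.Set.contains] at h'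
      exact h'
    show firstHit s cur [1, 2, 3, 4, 5] = if b - cur ≤ 5 then some b else none
    by_cases h5 : b - cur ≤ 5
    · rw [if_pos h5]
      have hd : b - cur = 1 ∨ b - cur = 2 ∨ b - cur = 3 ∨ b - cur = 4 ∨ b - cur = 5 := by omega
      rcases hd with h | h | h | h | h
      · have e : cur + 1 = b := by omega
        simp [firstHit, e, hbin]
      · have m1 : cur + 1 ∉ s := hnotin _ (by omega) (by omega)
        have e : cur + 2 = b := by omega
        simp [firstHit, m1, e, hbin]
      · have m1 : cur + 1 ∉ s := hnotin _ (by omega) (by omega)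
        have m2 : cur + 2 ∉ s := hnotin _ (by omega) (by omega)
        have e : cur + 3 = b := by omega
        simp [firstHit, m1, m2, e, hbin]
      · have m1 : cur + 1 ∉ s := hnotin _ (by omega) (by omega)
        have m2 : cur + 2 ∉ s := hnotin _ (by omega) (by omega)
        have m3 : cur + 3 ∉ s := hnotin _ (by omega) (by omega)
        have e : cur + 4 = b := by omega
        simp [firstHit, m1, m2, m3, e, hbin]
      · have m1 : cur + 1 ∉ s := hnotin _ (by omega) (by omega)
        have m2 : cur + 2 ∉ s := hnotin _ (by omega) (by omega)
        have m3 : cur + 3 ∉ s := hnotin _ (by omega) (by omega)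
        have m4 : cur + 4 ∉ s := hnotin _ (by omega) (by omega)
        have e : cur + 5 = b := by omega
        simp [firstHit, m1, m2, m3, m4, e, hbin]
    · rw [if_neg h5]
      apply firstHit_none
      intro d hd
      have hd' : 1 ≤ d ∧ d ≤ 5 := by
        simp only [List.mem_cons, List.not_mem_nil, or_false] at hd
        rcases hd with rfl | rfl | rfl | rfl | rfl <;> omega
      exact hbetween _ (by omega) (by omega)

-- the membership walk from cur materialises exactly the chain continuing cur
lemma walkB_char (s : PySem.Set Int) : ∀ (v : List Int) (fuel : Nat) (u run : List Int) (cur : Int),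
    (∀ x : Int, PySem.Set.contains s x = true ↔ x ∈ u ++ cur :: v) →
    (u ++ cur :: v).Pairwise (· < ·) → v.length ≤ fuel →
    walkB s fuel run cur = run ++ (split cur v).1 := by
  intro v
  induction v with
  | nil =>
    intro fuel u run cur hmem hpw _
    cases fuel with
    | zero => simp [walkB, split]
    | succ f =>
      simp only [walkB, firstHit_char s u cur [] hmem hpw]
      simp [split]
  | cons b v' ih =>
    intro fuel u run cur hmem hpw hlen
    cases fuel with
    | zero => simp at hlen
    | succ f =>
      simp only [walkB, firstHit_char s u cur (b :: v') hmem hpw]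
      by_cases h5 : b - cur ≤ 5
      · rw [if_pos h5]
        have hmem' : ∀ x : Int, PySem.Set.contains s x = true ↔ x ∈ (u ++ [cur]) ++ b :: v' := by
          intro x; rw [hmem x]; simp
        have hpw' : ((u ++ [cur]) ++ b :: v').Pairwise (· < ·) := by simpa using hpw
        have hrec := ih f (u ++ [cur]) (run ++ [b]) b hmem' hpw' (by simpa using Nat.le_of_succ_le_succ hlen)
        show walkB s f (run ++ [b]) b = run ++ (split cur (b :: v')).1
        rw [hrec]
        have hc : b - cur ≤ 5 := h5
        simp [split, hc]
      · rw [if_neg h5]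
        show run = run ++ (split cur (b :: v')).1
        have hc : ¬ b ≤ 5 + cur := by omega
        simp [split, hc]

-- B's loop over the sorted starts equals a best-pick fold over the runs
lemma Bfold_main (s : PySem.Set Int) (sp : List Int)
    (hmem : ∀ x : Int, PySem.Set.contains s x = true ↔ x ∈ sp)
    (hpw : sp.Pairwise (· < ·)) (hsl : sp.length ≤ s.length) :
    ∀ (n : Nat) (rem u best : List Int), rem.length ≤ n → sp = u ++ rem →
    (∀ x ∈ u, ∀ y ∈ rem, x + 5 < y) →
    (rem.filter (fun q => !((PySem.List.pyRange 1 6 1).any (fun d => PySem.Set.contains s (q - d))))).foldl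
        (stepWalk s) best
      = (runsOf rem).foldl (fun best r => if best.length < r.length then r else best) best := by
  intro n
  induction n with
  | zero =>
    intro rem u best hn hsp _
    have : rem = [] := List.eq_nil_of_length_eq_zero (Nat.le_zero.1 hn)
    subst this
    simp [runsOf]
  | succ n ih =>
    intro rem u best hn hsp hbound
    match rem with
    | [] => simp [runsOf]
    | a :: t =>
      have hpw_rem : (a :: t).Pairwise (· < ·) := (List.pairwise_append.1 (hsp ▸ hpw)).2.1
      have hR : PySem.List.pyRange 1 6 1 = [1, 2, 3, 4, 5] := by decide
      have hmemd : ∀ d ∈ PySem.List.pyRange 1 6 1, 1 ≤ d ∧ d ≤ 5 := by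
        rw [hR]; intro d hd
        simp only [List.mem_cons, List.not_mem_nil, or_false] at hd
        rcases hd with rfl | rfl | rfl | rfl | rfl <;> omega
      -- a is a start
      have hPa : (fun q => !((PySem.List.pyRange 1 6 1).any (fun d => PySem.Set.contains s (q - d)))) a = true := by
        show (!((PySem.List.pyRange 1 6 1).any (fun d => PySem.Set.contains s (a - d)))) = true
        simp only [Bool.not_eq_true', List.any_eq_false]
        intro d hd
        obtain ⟨h1, h2⟩ := hmemd d hd
        cases h : PySem.Set.contains s (a - d)
        · simp
        · exfalso
          have hm := (hmem _).1 h
          rw [hsp] at hm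
          rcases List.mem_append.1 hm with hh | hh
          · have := hbound _ hh a (by simp); omega
          · rcases List.mem_cons.1 hh with heq | hh'
            · omega
            · have := (List.pairwise_cons.1 hpw_rem).1 _ hh'; omega
      -- no element of the chain is a start
      have hPe : ∀ e ∈ (split a t).1,
          (!((PySem.List.pyRange 1 6 1).any (fun d => PySem.Set.contains s (e - d)))) = false := by
        intro e he
        obtain ⟨pd, hpd, h1, h2⟩ := split_mem_pred a t hpw_rem e he
        simp only [Bool.not_eq_false', List.any_eq_true]
        refine ⟨e - pd, by rw [hR]; simp only [List.mem_cons]; omega, ?_⟩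
        have hpdsp : pd ∈ sp := by
          rw [hsp]
          rcases hpd with rfl | hpd'
          · simp
          · have : pd ∈ t := by
              rw [← split_append a t]; exact List.mem_append.2 (Or.inl hpd')
            simp [this]
        rw [show e - (e - pd) = pd by ring]
        exact (hmem pd).2 hpdsp
      -- the filtered list starts with a, the chain is filtered out
      have hsplit_t : t = (split a t).1 ++ (split a t).2 := (split_append a t).symm
      have hfilter : (a :: t).filter (fun q => !((PySem.List.pyRange 1 6 1).any (fun d => PySem.Set.contains s (q - d))))
          = a :: (split a t).2.filter (fun q => !((PySem.List.pyRange 1 6 1).any (fun d => PySem.Set.contains s (q - d)))) := by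
        have h1 : ((split a t).1).filter (fun q => !((PySem.List.pyRange 1 6 1).any (fun d => PySem.Set.contains s (q - d)))) = [] := by
          refine List.filter_eq_nil_iff.2 (fun e he => ?_)
          show ¬ ((!((PySem.List.pyRange 1 6 1).any (fun d => PySem.Set.contains s (e - d)))) = true)
          rw [hPe e he]
          simp
        rw [List.filter_cons, if_pos hPa]
        conv_lhs => rw [hsplit_t]
        rw [List.filter_append, h1, List.nil_append]
      -- the walk from a gives the first run
      have hwalk : walkB s s.length [a] a = a :: (split a t).1 := by
        have := walkB_char s t s.length u [a] a
          (by intro x; rw [hmem x, hsp]) (hsp ▸ hpw)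
          (by
            have : t.length < sp.length := by rw [hsp]; simp; omega
            omega)
        rw [this]; rfl
      rw [hfilter, List.foldl_cons]
      have hstep : stepWalk s best a = if best.length < (a :: (split a t).1).length then (a :: (split a t).1) else best := by
        simp only [stepWalk, hwalk]
      -- recurse on the remainder
      have hrec := ih (split a t).2 (u ++ a :: (split a t).1)
        (stepWalk s best a)
        (by have := split_len a t; simp at hn; omega)
        (by rw [hsp]; conv_lhs => rw [hsplit_t]
            simp)
        (by
          intro x hx y hy
          rcases List.mem_append.1 hx with hh | hh
          · exact hbound x hh y (by
              have : y ∈ t := by rw [← split_append a t]; exact List.mem_append.2 (Or.inr hy)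
              simp [this])
          · exact split_rest_gap a t hpw_rem y hy x (by
              rcases List.mem_cons.1 hh with rfl | h' 
              · exact Or.inl rfl
              · exact Or.inr h'))
      rw [hrec]
      conv_rhs => rw [show runsOf (a :: t) = (a :: (split a t).1) :: runsOf (split a t).2 from by simp [runsOf]]
      rw [List.foldl_cons, ← hstep]

lemma pickfold_lt : ∀ (pre : List (List Int)) (best : List Int) (L : Nat), best.length < L →
    (∀ r ∈ pre, r.length < L) →
    (pre.foldl (fun best r => if best.length < r.length then r else best) best).length < L := by
  intro pre
  induction pre with
  | nil => intro best L h _; simpa using h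
  | cons r rs ih =>
    intro best L h hall
    simp only [List.foldl_cons]
    by_cases hc : best.length < r.length
    · rw [if_pos hc]; exact ih r L (hall r (by simp)) (fun r' hr' => hall r' (by simp [hr']))
    · rw [if_neg hc]; exact ih best L h (fun r' hr' => hall r' (by simp [hr']))

lemma pickfold_keep : ∀ (post : List (List Int)) (best : List Int),
    (∀ r ∈ post, r.length ≤ best.length) →
    post.foldl (fun best r => if best.length < r.length then r else best) best = best := by
  intro post
  induction post with
  | nil => intro _ _; rfl
  | cons r rs ih =>
    intro best h
    simp only [List.foldl_cons]
    rw [if_neg (by have := h r (by simp); omega)]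
    exact ih best (fun r' hr' => h r' (by simp [hr']))

lemma pickfold_first (pre : List (List Int)) (b : List Int) (post : List (List Int)) (hb : b ≠ [])
    (hpre : ∀ r ∈ pre, r.length < b.length) (hpost : ∀ r ∈ post, r.length ≤ b.length) :
    (pre ++ b :: post).foldl (fun best r => if best.length < r.length then r else best) [] = b := by
  rw [List.foldl_append, List.foldl_cons]
  have h0 := pickfold_lt pre [] b.length (by simpa using List.length_pos_of_ne_nil hb) hpre
  rw [if_pos h0]
  exact pickfold_keep post b hpost

-- ===== VERDICT (by name: the statement is the Claim_ definition above) =====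
theorem detect_sequential_ports_spec : Claim_equal_detect_sequential_ports := by
  intro src _dom
  unfold Spec_detect_sequential_ports detect_sequential_ports detect_sequential_ports_alt
  by_cases hlen : src.length < 3
  · simp [hlen]
  · simp only [if_neg hlen]
    set s : PySem.Set Int := PySem.Set.ofList src with hs_def
    set sp := PySem.List.sorted s (fun x => x) false with hsp_def
    have hsrc_ne : src ≠ [] := by intro h; subst h; simp at hlen
    have hsp_ne : sp ≠ [] := by
      rw [hsp_def, Ne, PySem.List.sorted_eq_nil_iff]
      intro h
      rcases List.exists_cons_of_ne_nil hsrc_ne with ⟨x, xs, hx⟩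
      have : x ∈ s := by rw [hs_def, PySem.Set.mem_ofList]; simp [hx]
      rw [h] at this
      simp at this
    rcases List.exists_cons_of_ne_nil hsp_ne with ⟨a, t, hsp⟩
    have hmem : ∀ x : Int, PySem.Set.contains s x = true ↔ x ∈ sp := by
      intro x
      rw [hsp_def, PySem.List.mem_sorted]
      simp [PySem.Set.contains]
    have hpw : sp.Pairwise (· < ·) := by
      rw [hsp_def, hs_def]; exact PySem.List.sorted_ofList_pairwise_lt (xs := src)
    have hsl : sp.length ≤ s.length := by rw [hsp_def, PySem.List.length_sorted]
    -- A's fold = recA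
    have hb := bridgeA sp t [] a (1, 1, 0, 0) (by simpa using hsp)
    simp only [List.length_nil, Nat.cast_zero, zero_add] at hb
    -- the proof-side grouping fold over sp
    have hne : ([a] : List Int) ≠ [] := by simp
    have H := main_inv t [] [a] hne 1 0 (Or.inr (by simp))
    simp only [List.flatten_nil, List.length_nil, Nat.cast_zero, List.length_cons,
      Nat.cast_one, zero_add, List.getLast_singleton] at H
    obtain ⟨_, _, hBest⟩ := H
    set stB := t.foldl stepB ([], [a]) with hstB_def
    -- the grouping fold computes runsOf sp
    have hruns_eq : stB.1 ++ [stB.2] = runsOf sp := by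
      have := foldB_split t [] [a] hne
      simp only [List.getLast_singleton] at this
      rw [hstB_def, this, hsp]
      simp [runsOf]
    obtain ⟨pre, b, post, hruns, hb_ne, hmr, hbrs, hpre, hpost⟩ := hBest
    rw [hruns_eq] at hruns
    -- sp decomposition
    have hsp_eq : sp = pre.flatten ++ (b ++ post.flatten) := by
      have := runsOf_flatten sp
      rw [hruns] at this
      rw [← this]
      simp
    rw [hb]
    -- B's side: starts = filter over sp, then fold = pick over runsOf sp
    set P : Int → Bool := fun q => !((PySem.List.pyRange 1 6 1).any (fun d => PySem.Set.contains s (q - d))) with hP_def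
    have hstarts : PySem.List.sorted (s.filter P) (fun x => x) false = sp.filter P := by
      have hperm : (sp.filter P).Perm (s.filter P) := by
        have h : sp.Perm s := by rw [hsp_def]; apply PySem.List.sorted_perm
        exact h.filter P
      have hpwf : (sp.filter P).Pairwise (· < ·) := hpw.filter P
      exact PySem.List.sorted_eq_of_perm_of_pairwise_lt _ _ _ hperm hpwf
    have hBfold : (sp.filter P).foldl (stepWalk s) []
        = (runsOf sp).foldl (fun best r => if best.length < r.length then r else best) [] := by
      exact Bfold_main s sp hmem hpw hsl sp.length sp [] [] (le_refl _) (by simp) (by simp)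
    have hBpick : (runsOf sp).foldl (fun best r => if best.length < r.length then r else best) [] = b := by
      rw [hruns]
      exact pickfold_first pre b post hb_ne hpre hpost
    rw [hstarts, hBfold, hBpick, hmr, hbrs]
    by_cases h3 : 3 ≤ b.length
    · rw [if_pos (by exact_mod_cast h3), if_pos h3]
      have hslice : PySem.List.slice sp (some (pre.flatten.length : Int))
          (some ((pre.flatten.length : Int) + (b.length : Int))) = b := by
        rw [PySem.List.slice_natCast_add, hsp_eq, List.drop_left, List.take_left]
      rw [hslice]
    · rw [if_neg (by exact_mod_cast h3), if_neg h3]
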